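-- pv_equiv track=rewrite | github.com/polifonia-project/tunes-code | scripts/pitchcontext/visualize.py | getColoredIxs
-- ===== SOURCE A (Python) =====
-- def getColoredIxs(target_ixs, ixs, songlength):
--     colorixs = []
--     for ix in target_ixs:
--         colorixs.append(ix)
--         temp_ix = ix+1
--         while (not temp_ix in ixs) and (temp_ix < songlength):
--             colorixs.append(temp_ix)
--             temp_ix += 1
--     return colorixs
-- ===== SOURCE B (Python) =====
-- def getColoredIxs(target_ixs, ixs, songlength):
--     s = sorted(ixs)
--     colorixs = []
--     for ix in target_ixs:
--         # bisect_right: first position whose element is > ix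
--         lo, hi = 0, len(s)
--         while lo < hi:
--             mid = (lo + hi) // 2
--             if s[mid] <= ix:
--                 lo = mid + 1
--             else:
--                 hi = mid
--         nxt = s[lo] if lo < len(s) else songlength
--         end = min(nxt, songlength)
--         colorixs.append(ix)
--         colorixs.extend(range(ix + 1, end))
--     return colorixs
-- ===== Notes on version B (the rewrite author's own statement) =====
-- stated objective: faster
-- what changed: B sorts ixs once and locates each run's endpoint with a binary search (bisect_right written out), then emits the whole run as one arithmetic range, instead of A's per-emitted-index incremental walk with a linear membership scan of ixs at every step.
import Mathlib
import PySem

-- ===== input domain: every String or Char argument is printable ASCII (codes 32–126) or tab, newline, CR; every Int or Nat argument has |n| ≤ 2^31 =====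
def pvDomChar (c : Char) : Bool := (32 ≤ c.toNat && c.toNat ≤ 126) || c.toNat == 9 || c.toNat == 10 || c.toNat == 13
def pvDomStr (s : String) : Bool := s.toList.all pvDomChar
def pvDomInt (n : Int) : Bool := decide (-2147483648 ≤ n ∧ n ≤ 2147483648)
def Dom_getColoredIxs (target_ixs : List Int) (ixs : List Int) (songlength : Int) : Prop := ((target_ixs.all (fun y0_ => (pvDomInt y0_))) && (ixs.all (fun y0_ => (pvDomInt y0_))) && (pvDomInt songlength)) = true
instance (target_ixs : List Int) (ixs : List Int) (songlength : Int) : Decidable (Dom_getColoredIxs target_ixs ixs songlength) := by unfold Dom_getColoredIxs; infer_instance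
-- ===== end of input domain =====

-- B sorts ixs once and finds each run's endpoint by binary search, emitting the run
-- as an arithmetic range, instead of A's per-step membership walk (objective: faster).


-- ===== PORT A =====
-- the inner 'while (not temp_ix in ixs) and (temp_ix < songlength)' loop of A
def pyWhileScan (ixs : List Int) (songlength : Int) (t : Int) : List Int :=
  if h : (¬ t ∈ ixs) ∧ t < songlength then
    t :: pyWhileScan ixs songlength (t + 1)
  else []
termination_by (songlength - t).toNat
decreasing_by omega

def getColoredIxs (target_ixs : List Int) (ixs : List Int) (songlength : Int) : List Int :=
  target_ixs.foldl (fun colorixs ix => colorixs ++ ix :: pyWhileScan ixs songlength (ix + 1)) []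

-- ===== PORT B =====
-- the inner 'while lo < hi' bisect_right loop of B; lo, hi stay within [0, s.length],
-- so Nat subscripts and Nat (lo+hi)/2 coincide with Python's s[mid] and (lo+hi)//2 here
def bsearch (s : List Int) (ix : Int) (lo hi : Nat) : Nat :=
  if h : lo < hi then
    let mid := (lo + hi) / 2
    if s.getD mid 0 ≤ ix then bsearch s ix (mid + 1) hi else bsearch s ix lo mid
  else lo
termination_by hi - lo
decreasing_by all_goals omega

-- per-iteration endpoint: nxt = s[lo] if lo < len(s) else songlength; end = min(nxt, songlength)
def runEnd (s : List Int) (ix : Int) (songlength : Int) : Int :=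
  let lo := bsearch s ix 0 s.length
  let nxt := if lo < s.length then s.getD lo 0 else songlength
  min nxt songlength

def getColoredIxs_alt (target_ixs : List Int) (ixs : List Int) (songlength : Int) : List Int :=
  let s := PySem.List.sorted ixs (fun x => x) false
  target_ixs.foldl
    (fun colorixs ix => colorixs ++ ix :: PySem.List.pyRange (ix + 1) (runEnd s ix songlength) 1) []

-- ===== PRECONDITION & SPEC =====
def Spec_getColoredIxs (target_ixs : List Int) (ixs : List Int) (songlength : Int) (out : List Int) : Prop := out = getColoredIxs_alt target_ixs ixs songlength
instance (target_ixs : List Int) (ixs : List Int) (songlength : Int) (out : List Int) : Decidable (Spec_getColoredIxs target_ixs ixs songlength out) := by unfold Spec_getColoredIxs; infer_instance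

-- ===== CLAIM (what is proved, stated in full; the proofs are below) =====
def Claim_equal_getColoredIxs : Prop := ∀ (target_ixs : List Int) (ixs : List Int) (songlength : Int), Dom_getColoredIxs target_ixs ixs songlength → Spec_getColoredIxs target_ixs ixs songlength (getColoredIxs target_ixs ixs songlength)

-- ===== LEMMAS AND PROOFS =====

-- sorted lists are monotone under getD on in-range indices
theorem sorted_getD_mono (s : List Int) (hs : s.Pairwise (· ≤ ·)) {i j : Nat}
    (hij : i ≤ j) (hj : j < s.length) : s.getD i 0 ≤ s.getD j 0 := by
  rcases Nat.eq_or_lt_of_le hij with rfl | h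
  · exact le_rfl
  · rw [List.getD_eq_getElem s 0 (lt_trans h hj), List.getD_eq_getElem s 0 hj]
    exact List.pairwise_iff_getElem.mp hs i j (lt_trans h hj) hj h

-- invariant of B's binary-search loop: elements below the result are ≤ ix,
-- elements at or above it are > ix
theorem bsearch_spec (s : List Int) (hs : s.Pairwise (· ≤ ·)) (ix : Int) :
    ∀ (k lo hi : Nat), hi - lo = k → lo ≤ hi → hi ≤ s.length →
      (∀ i, i < lo → s.getD i 0 ≤ ix) →
      (∀ i, hi ≤ i → i < s.length → ix < s.getD i 0) →
      bsearch s ix lo hi ≤ s.length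
        ∧ (∀ i, i < bsearch s ix lo hi → s.getD i 0 ≤ ix)
        ∧ (∀ i, bsearch s ix lo hi ≤ i → i < s.length → ix < s.getD i 0) := by
  intro k
  induction k using Nat.strong_induction_on with
  | _ k ih =>
    intro lo hi hk hlohi hhi hlow hhigh
    by_cases h : lo < hi
    · rw [bsearch, dif_pos h]
      simp only []
      set mid := (lo + hi) / 2 with hmid
      have hmid1 : lo ≤ mid := by omega
      have hmid2 : mid < hi := by omega
      by_cases hcmp : s.getD mid 0 ≤ ix
      · rw [if_pos hcmp]
        refine ih (hi - (mid + 1)) (by omega) (mid + 1) hi rfl (by omega) hhi ?_ hhigh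
        intro i hi'
        exact le_trans (sorted_getD_mono s hs (by omega) (by omega)) hcmp
      · rw [if_neg hcmp]
        refine ih (mid - lo) (by omega) lo mid rfl (by omega) (by omega) hlow ?_
        intro i hi1 hi2
        exact lt_of_not_ge (fun hle => hcmp (le_trans (sorted_getD_mono s hs hi1 hi2) hle))
    · rw [bsearch, dif_neg h]
      exact ⟨by omega, fun i hi' => hlow i hi', fun i hi1 hi2 => hhigh i (by omega) hi2⟩

-- characterisation of B's per-iteration endpoint n = runEnd (sorted ixs) ix songlength
theorem runEnd_spec (ixs : List Int) (songlength ix : Int) :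
    (runEnd (PySem.List.sorted ixs (fun x => x) false) ix songlength = songlength
        ∨ (runEnd (PySem.List.sorted ixs (fun x => x) false) ix songlength ∈ ixs
            ∧ ix < runEnd (PySem.List.sorted ixs (fun x => x) false) ix songlength))
      ∧ runEnd (PySem.List.sorted ixs (fun x => x) false) ix songlength ≤ songlength
      ∧ ∀ x ∈ ixs, ix < x → runEnd (PySem.List.sorted ixs (fun x => x) false) ix songlength ≤ x := by
  set s := PySem.List.sorted ixs (fun x => x) false with hsdef
  have hs : s.Pairwise (· ≤ ·) := PySem.List.sorted_pairwise ixs (fun x => x)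
  obtain ⟨hr, hlow, hhigh⟩ :=
    bsearch_spec s hs ix s.length 0 s.length rfl (by omega) le_rfl
      (by omega) (by intro i h1 h2; omega)
  set r := bsearch s ix 0 s.length with hrdef
  have hrange : ∀ x ∈ ixs, ix < x →
      (if r < s.length then s.getD r 0 else songlength) ≤ x := by
    intro x hx hixx
    have hxs : x ∈ s := (PySem.List.mem_sorted ixs (fun y => y) false x).mpr hx
    obtain ⟨i, hi, hxi⟩ := List.getElem_of_mem hxs
    have hgd : s.getD i 0 = x := by rw [List.getD_eq_getElem s 0 hi, hxi]
    have hir : r ≤ i := by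
      by_contra hlt
      have := hlow i (by omega)
      omega
    have hrl : r < s.length := lt_of_le_of_lt hir hi
    rw [if_pos hrl, ← hgd]
    exact sorted_getD_mono s hs hir hi
  unfold runEnd
  rw [← hrdef]
  simp only []
  by_cases hrl : r < s.length
  · rw [if_pos hrl]
    refine ⟨?_, min_le_right _ _, ?_⟩
    · by_cases hns : songlength ≤ s.getD r 0
      · exact Or.inl (min_eq_right hns)
      · refine Or.inr ⟨?_, ?_⟩
        · rw [min_eq_left (by omega)]
          have : s.getD r 0 ∈ s := by
            rw [List.getD_eq_getElem s 0 hrl]; exact List.getElem_mem hrl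
          exact (PySem.List.mem_sorted ixs (fun y => y) false _).mp this
        · have := hhigh r le_rfl hrl
          rw [min_eq_left (by omega)]
          exact this
    · intro x hx hixx
      have := hrange x hx hixx
      rw [if_pos hrl] at this
      exact le_trans (min_le_left _ _) this
  · rw [if_neg hrl]
    refine ⟨Or.inl (min_self _), le_of_eq (min_self _), ?_⟩
    intro x hx hixx
    have := hrange x hx hixx
    rw [if_neg hrl] at this
    rw [min_self]
    exact this

-- A's while loop produces exactly the integer range [t, n) when nothing in ixs
-- lies in [t, n), everything there is < songlength, and n itself stops the loop
theorem pyWhileScan_eq_range (ixs : List Int) (songlength : Int) (n : Int)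
    (hstop : n ∈ ixs ∨ songlength ≤ n) :
    ∀ (k : Nat) (t : Int), (n - t).toNat = k → t ≤ n →
      (∀ x : Int, t ≤ x → x < n → x ∉ ixs ∧ x < songlength) →
      pyWhileScan ixs songlength t = PySem.List.pyRange t n 1 := by
  intro k
  induction k with
  | zero =>
    intro t hk ht _
    have htn : t = n := by omega
    subst htn
    rw [pyWhileScan, PySem.List.pyRange_one_eq_nil (by omega)]
    rcases hstop with h | h
    · simp [h]
    · simp; omega
  | succ k ih =>
    intro t hk ht hinv
    have htn : t < n := by omega
    obtain ⟨hmem, hsl⟩ := hinv t le_rfl htn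
    rw [pyWhileScan, dif_pos ⟨hmem, hsl⟩, PySem.List.pyRange_one_cons (by omega)]
    congr 1
    exact ih (t + 1) (by omega) (by omega) (fun x hx hxn => hinv x (by omega) hxn)

-- per-target-index block equality
theorem block_eq (ixs : List Int) (songlength ix : Int) :
    pyWhileScan ixs songlength (ix + 1)
      = PySem.List.pyRange (ix + 1)
          (runEnd (PySem.List.sorted ixs (fun x => x) false) ix songlength) 1 := by
  obtain ⟨h1, h2, h3⟩ := runEnd_spec ixs songlength ix
  set n := runEnd (PySem.List.sorted ixs (fun x => x) false) ix songlength with hn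
  by_cases hle : ix + 1 ≤ n
  · have hstop : n ∈ ixs ∨ songlength ≤ n := by
      rcases h1 with h | h
      · exact Or.inr (le_of_eq h.symm)
      · exact Or.inl h.1
    refine pyWhileScan_eq_range ixs songlength n hstop ((n - (ix+1)).toNat) (ix+1) rfl hle ?_
    intro x hx hxn
    refine ⟨fun hmem => ?_, by omega⟩
    have := h3 x hmem (by omega)
    omega
  · -- n < ix + 1, so n = songlength ≤ ix and the while loop runs 0 times
    have hns : n = songlength := by rcases h1 with h | h <;> omega
    rw [pyWhileScan, PySem.List.pyRange_one_eq_nil (by omega)]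
    simp; omega

-- ===== VERDICT (by name: the statement is the Claim_ definition above) =====
theorem getColoredIxs_spec : Claim_equal_getColoredIxs := by
  intro target_ixs ixs songlength _
  unfold Spec_getColoredIxs getColoredIxs getColoredIxs_alt
  simp only []
  congr 1
  funext colorixs ix
  rw [block_eq]
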